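-- pv_equiv track=rewrite | github.com/iskinn/GeekBrainsPython_level02 | lesson_04/l_02.py | find_multiple
-- ===== SOURCE A (Python) =====
-- multiple = {}
--
-- def find_multiple(n):
--     spam = []
--     for x in range(2,11):
--         for y in range(2,n):
--             if y % x == 0:
--                 spam.append(y)
--         multiple[x] = spam
--         spam = []
--     return multiple
-- ===== SOURCE B (Python) =====
-- multiple = {}
--
-- def find_multiple(n):
--     multiple.update({x: list(range(x, n, x)) for x in range(2, 11)})
--     return multiple
-- ===== Notes on version B (the rewrite author's own statement) =====
-- stated objective: faster
-- what changed: Replaces the nested scan-and-filter loops and per-key dict insertion with a single dict comprehension whose values are generated directly as stride-x ranges range(x, n, x), so no divisibility tests and no inner full scan remain.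
import Mathlib
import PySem

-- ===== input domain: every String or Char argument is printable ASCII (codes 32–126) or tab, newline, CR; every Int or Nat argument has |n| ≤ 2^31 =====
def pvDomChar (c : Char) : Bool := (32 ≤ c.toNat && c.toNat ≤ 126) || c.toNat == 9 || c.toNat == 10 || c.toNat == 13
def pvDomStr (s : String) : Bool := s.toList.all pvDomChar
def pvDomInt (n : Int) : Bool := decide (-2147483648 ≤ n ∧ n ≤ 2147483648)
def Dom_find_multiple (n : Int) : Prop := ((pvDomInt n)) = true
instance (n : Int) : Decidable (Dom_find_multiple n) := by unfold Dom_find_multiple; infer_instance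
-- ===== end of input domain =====

-- B builds the result in one dict comprehension whose values are stride-x ranges,
-- replacing A's nested scan-and-filter loops and per-key insertions (constant-factor faster).
-- Both Pythons mutate and return the same module-level dict (keys 2..10 are overwritten on
-- every call); the return value is what is proved equal here.

-- ===== PORT A =====
def find_multiple (n : Int) : List (Int × List Int) :=
  ((PySem.List.pyRange 2 11 1).foldl
    (fun d x => PySem.Dict.insert d x
      ((PySem.List.pyRange 2 n 1).foldl
        (fun spam y => if PySem.Int.mod y x == 0 then spam ++ [y] else spam) []))
    PySem.Dict.empty).items

-- ===== PORT B =====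
-- dict comprehension over the distinct keys 2..10: the association list in insertion
-- order is exactly the mapped list of (key, stride-range) pairs
def find_multiple_alt (n : Int) : List (Int × List Int) :=
  (PySem.List.pyRange 2 11 1).map (fun x => (x, PySem.List.pyRange x n x))

-- ===== PRECONDITION & SPEC =====
def Spec_find_multiple (n : Int) (out : List (Int × List Int)) : Prop := out = find_multiple_alt n
instance (n : Int) (out : List (Int × List Int)) : Decidable (Spec_find_multiple n out) := by unfold Spec_find_multiple; infer_instance

-- ===== CLAIM =====
def Claim_equal_find_multiple : Prop := ∀ (n : Int), Dom_find_multiple n → Spec_find_multiple n (find_multiple n)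

-- ===== LEMMAS AND PROOFS =====

-- a positive-step range is strictly increasing
lemma pairwise_lt_pyRange_pos (a b s : Int) (hs : 0 < s) :
    (PySem.List.pyRange a b s).Pairwise (· < ·) := by
  rw [PySem.List.pyRange_of_pos a b hs]
  refine List.Pairwise.map _ ?_ List.pairwise_lt_range
  intro i j hij
  have : (i : Int) < (j : Int) := by exact_mod_cast hij
  nlinarith

-- A's inner scan-and-filter loop computes exactly range(x, n, x), for any 2 ≤ x
lemma inner_eq (x n : Int) (hx : 2 ≤ x) :
    (PySem.List.pyRange 2 n 1).foldl
      (fun spam y => if PySem.Int.mod y x == 0 then spam ++ [y] else spam) ([] : List Int)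
    = PySem.List.pyRange x n x := by
  have hxpos : (0 : Int) < x := by omega
  have hfold := PySem.List.foldl_append_if
      (fun y => PySem.Int.mod y x == 0) (fun y : Int => y) (PySem.List.pyRange 2 n 1) []
  simp only [List.map_id_fun', id] at hfold
  rw [hfold, List.nil_append]
  have hL : (List.filter (fun y => PySem.Int.mod y x == 0) (PySem.List.pyRange 2 n 1)).Pairwise (· < ·) :=
    List.Pairwise.filter _ (PySem.List.pairwise_lt_pyRange_one 2 n)
  have hR : (PySem.List.pyRange x n x).Pairwise (· < ·) := pairwise_lt_pyRange_pos x n x hxpos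
  have hmem : ∀ a : Int,
      a ∈ List.filter (fun y => PySem.Int.mod y x == 0) (PySem.List.pyRange 2 n 1) ↔
      a ∈ PySem.List.pyRange x n x := by
    intro a
    rw [List.mem_filter, PySem.List.mem_pyRange_one,
        PySem.List.mem_pyRange_iff_of_pos hxpos]
    have hdv : (PySem.Int.mod a x == 0) = true ↔ x ∣ a := by
      simp [PySem.Int.mod_eq_zero_iff_dvd]
    constructor
    · rintro ⟨⟨h2, hn⟩, hd⟩
      have hdvd : x ∣ a := hdv.mp hd
      have hxa : x ≤ a := Int.le_of_dvd (by omega) hdvd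
      exact ⟨hxa, hn, (dvd_sub_right hdvd).mpr dvd_rfl⟩
    · rintro ⟨hxa, hn, hd⟩
      have hdvd : x ∣ a := by
        have := dvd_add hd (dvd_refl x)
        simpa using this
      exact ⟨⟨by omega, hn⟩, hdv.mpr hdvd⟩
  have hperm : (List.filter (fun y => PySem.Int.mod y x == 0) (PySem.List.pyRange 2 n 1)).Perm
      (PySem.List.pyRange x n x) :=
    (List.perm_ext_iff_of_nodup
      (hL.imp ne_of_lt) (hR.imp ne_of_lt)).mpr hmem
  exact hperm.eq_of_pairwise (fun a b _ _ h1 h2 => absurd h2 (lt_asymm h1)) hL hR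

-- ===== VERDICT =====
theorem find_multiple_spec : Claim_equal_find_multiple := by
  intro n _
  show find_multiple n = find_multiple_alt n
  unfold find_multiple find_multiple_alt
  rw [PySem.List.foldl_congr_mem (PySem.List.pyRange 2 11 1) _
      (fun d x => PySem.Dict.insert d x (PySem.List.pyRange x n x)) PySem.Dict.empty
      (fun d x hx => by rw [inner_eq x n ((PySem.List.mem_pyRange_one.mp hx).1)])]
  have h := PySem.Dict.items_foldl_insert_fresh (PySem.List.pyRange 2 11 1) id
      (fun x => PySem.List.pyRange x n x) PySem.Dict.empty
      (fun a _ => PySem.Dict.contains_empty a)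
      (by simpa [List.Nodup] using (PySem.List.pairwise_lt_pyRange_one 2 11).imp ne_of_lt)
  simpa [PySem.Dict.empty] using h
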